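-- pv_equiv track=rewrite | github.com/albert-r-waldron/cse6040-devkit | src/cse6040_devkit/utils.py | extract_definition
-- ===== SOURCE A (Python) =====
-- def extract_definition(source):
--     source_defined = False
--     source_lines = []
--     for line in source.splitlines():
--         if line.startswith('def'):
--             source_defined = True
--         if source_defined:
--             source_lines.append(line)
--     return '\n'.join(source_lines)
-- ===== SOURCE B (Python) =====
-- def extract_definition(source):
--     lines = source.splitlines()
--     i = next((k for k, line in enumerate(lines) if line.startswith('def')), None)
--     if i is None:
--         return ''
--     return '\n'.join(lines[i:])
-- ===== Notes on version B (the rewrite author's own statement) =====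
-- stated objective: simpler
-- what changed: Replaced A's sticky boolean flag with incremental list appends by a single boundary search (first line starting with 'def') followed by a tail slice and one join.
import Mathlib
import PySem

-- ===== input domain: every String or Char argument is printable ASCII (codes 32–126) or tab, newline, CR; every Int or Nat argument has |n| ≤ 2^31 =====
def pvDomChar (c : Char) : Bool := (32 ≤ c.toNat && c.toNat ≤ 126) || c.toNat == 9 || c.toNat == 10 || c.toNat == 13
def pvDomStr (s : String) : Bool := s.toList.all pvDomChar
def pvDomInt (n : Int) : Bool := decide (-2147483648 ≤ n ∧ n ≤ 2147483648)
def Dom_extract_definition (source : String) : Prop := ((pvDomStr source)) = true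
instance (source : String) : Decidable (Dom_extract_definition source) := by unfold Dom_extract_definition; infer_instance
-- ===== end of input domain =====

-- B replaces A's sticky flag + incremental appends by one search for the first 'def' line and a tail slice (objective: simpler).

-- ===== PORT A =====
def extract_definition (source : String) : String :=
  let st := (PySem.Str.splitlines source).foldl
    (fun (st : Bool × List String) line =>
      let defined := st.1 || PySem.Str.startswith line "def"
      (defined, if defined then st.2 ++ [line] else st.2))
    (false, [])
  PySem.Str.join "\n" st.2

-- ===== PORT B =====
def extract_definition_alt (source : String) : String :=
  let lines := PySem.Str.splitlines source
  match lines.findIdx? (fun l => PySem.Str.startswith l "def") with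
  | none => ""
  | some i => PySem.Str.join "\n" (lines.drop i)

-- ===== PRECONDITION & SPEC =====
def Spec_extract_definition (source : String) (out : String) : Prop := out = extract_definition_alt source
instance (source : String) (out : String) : Decidable (Spec_extract_definition source out) := by unfold Spec_extract_definition; infer_instance

-- ===== CLAIM (what is proved, stated in full; the proofs are below) =====
def Claim_equal_extract_definition : Prop := ∀ (source : String), Dom_extract_definition source → Spec_extract_definition source (extract_definition source)

-- ===== LEMMAS AND PROOFS =====

def pvStep : Bool × List String → String → Bool × List String :=
  fun st line =>
    let defined := st.1 || PySem.Str.startswith line "def"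
    (defined, if defined then st.2 ++ [line] else st.2)

theorem pvLoopT (ls acc : List String) : (ls.foldl pvStep (true, acc)).2 = acc ++ ls := by
  induction ls generalizing acc with
  | nil => simp
  | cons l ls ih => simp [pvStep, ih]

theorem pvLoopF (ls acc : List String) :
    (ls.foldl pvStep (false, acc)).2 =
      acc ++ (match ls.findIdx? (fun l => PySem.Str.startswith l "def") with
              | none => []
              | some i => ls.drop i) := by
  induction ls generalizing acc with
  | nil => simp
  | cons l ls ih =>
    by_cases h : PySem.Str.startswith l "def" = true
    · simp only [List.foldl_cons, pvStep, Bool.false_or, h, if_true, List.findIdx?_cons,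
        List.drop_zero, pvLoopT]
      simp
    · rw [Bool.not_eq_true] at h
      simp only [List.foldl_cons, pvStep, Bool.false_or, h, List.findIdx?_cons, ih]
      cases hf : ls.findIdx? (fun l => PySem.Str.startswith l "def") <;> simp only [hf] <;> simp

-- ===== VERDICT (by name: the statement is the Claim_ definition above) =====
theorem extract_definition_spec : Claim_equal_extract_definition := by
  intro source _
  unfold Spec_extract_definition extract_definition extract_definition_alt
  show PySem.Str.join "\n" ((PySem.Str.splitlines source).foldl pvStep (false, [])).2 = _
  rw [pvLoopF]
  cases hf : (PySem.Str.splitlines source).findIdx? (fun l => PySem.Str.startswith l "def") <;>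
      simp only [hf, List.nil_append]
  simp [PySem.Str.join, PySem.Chars.join, List.intercalate]
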